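-- pv_equiv track=rewrite | github.com/belovmd/it-academy-python-winter | src/HW_2_task_2_from_the_site.py | song_decoder
-- ===== SOURCE A (Python) =====
-- def song_decoder(song: str) -> str:
--     song = song.replace("WUB", " ")  # заменяем в предложении WUB на " "
--     char_index = 0
--     while char_index < len(song) - 1:  # цикл удаляет все повторяющиеся пробелы
--         if song[char_index] == song[char_index + 1] == " ":
--             song = song[:char_index + 1] + song[char_index + 2:]
--         else:
--             char_index += 1
--     return song.strip()  # возвращаем строку удалив пробелы вначале и в конце
-- ===== SOURCE B (Python) =====
-- def song_decoder(song: str) -> str: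
--     s = song.replace("WUB", " ")
--     result = []
--     prev_space = False
--     for ch in s:
--         if ch == ' ':
--             if not prev_space:
--                 result.append(' ')
--             prev_space = True
--         else:
--             result.append(ch)
--             prev_space = False
--     return ''.join(result).strip()
-- ===== Notes on version B (the rewrite author's own statement) =====
-- stated objective: faster
-- what changed: Replaces A's quadratic delete-in-place while loop (rebuilding the string on every duplicate space) with a single linear pass that appends each character, skipping a space when the previous emitted character was a space.
import Mathlib
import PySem

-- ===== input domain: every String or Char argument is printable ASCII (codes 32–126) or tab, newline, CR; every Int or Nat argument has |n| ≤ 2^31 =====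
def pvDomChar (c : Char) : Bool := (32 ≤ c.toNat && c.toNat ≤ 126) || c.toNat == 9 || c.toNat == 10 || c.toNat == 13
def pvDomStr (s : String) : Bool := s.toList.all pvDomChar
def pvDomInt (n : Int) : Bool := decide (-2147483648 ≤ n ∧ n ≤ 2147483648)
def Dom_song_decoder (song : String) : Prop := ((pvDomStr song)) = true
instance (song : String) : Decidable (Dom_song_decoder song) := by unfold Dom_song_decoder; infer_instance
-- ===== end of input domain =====

-- B replaces A's quadratic delete-in-place while loop with one linear pass using a
-- previous-char-was-a-space flag (objective: faster).

-- ===== PORT A =====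
-- the while loop: at each step either deletes the duplicate space at i+1 or advances i
def pvALoop (song : List Char) (i : Nat) : List Char :=
  if h : i + 1 < song.length then
    if song[i]'(by omega) = ' ' ∧ song[i + 1]'h = ' ' then
      pvALoop (song.take (i + 1) ++ song.drop (i + 2)) i
    else
      pvALoop song (i + 1)
  else song
termination_by song.length - i
decreasing_by
  · simp only [List.length_append, List.length_take, List.length_drop]; omega
  · omega

def song_decoder (song : String) : String :=
  String.ofList (PySem.Chars.strip (pvALoop (PySem.Str.replace song "WUB" " ").toList 0))

-- ===== PORT B =====
-- the for loop: result accumulator plus prev_space flag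
def pvBLoop (cs : List Char) (prevSpace : Bool) (result : List Char) : List Char :=
  match cs with
  | [] => result
  | c :: rest =>
    if c = ' ' then
      if prevSpace then pvBLoop rest true result
      else pvBLoop rest true (result ++ [' '])
    else pvBLoop rest false (result ++ [c])

def song_decoder_alt (song : String) : String :=
  String.ofList (PySem.Chars.strip (pvBLoop (PySem.Str.replace song "WUB" " ").toList false []))

-- ===== PRECONDITION & SPEC =====
def Spec_song_decoder (song : String) (out : String) : Prop := out = song_decoder_alt song
instance (song : String) (out : String) : Decidable (Spec_song_decoder song out) := by unfold Spec_song_decoder; infer_instance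

-- ===== CLAIM (what is proved, stated in full; the proofs are below) =====
def Claim_equal_song_decoder : Prop := ∀ (song : String), Dom_song_decoder song → Spec_song_decoder song (song_decoder song)

-- ===== LEMMAS AND PROOFS =====

-- non-accumulator form of B's pass
def pvSq : List Char → Bool → List Char
  | [], _ => []
  | c :: rest, prev =>
    if c = ' ' then
      if prev then pvSq rest true else ' ' :: pvSq rest true
    else c :: pvSq rest false

theorem pvBLoop_eq (cs : List Char) : ∀ prev acc, pvBLoop cs prev acc = acc ++ pvSq cs prev := by
  induction cs with
  | nil => intro prev acc; simp [pvBLoop, pvSq]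
  | cons c rest ih =>
    intro prev acc
    by_cases hc : c = ' ' <;> cases prev <;>
      simp [pvBLoop, pvSq, hc, ih]

theorem pvSq_true_of_head_ne (l : List Char) (h : ∀ c ∈ l.head?, c ≠ ' ') :
    pvSq l true = pvSq l false := by
  cases l with
  | nil => rfl
  | cons c rest =>
    have : c ≠ ' ' := h c (by simp)
    simp [pvSq, this]

theorem pvALoop_eq_aux : ∀ (n : Nat) (l : List Char) (i : Nat), l.length - i ≤ n →
    pvALoop l i = l.take i ++ pvSq (l.drop i) false := by
  intro n
  induction n with
  | zero =>
    intro l i hle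
    have h : ¬ i + 1 < l.length := by omega
    rw [pvALoop]
    simp only [h, dite_false]
    have hd : l.drop i = [] := by
      apply List.drop_eq_nil_of_le; omega
    rw [hd]
    simp [pvSq, List.take_of_length_le (by omega : l.length ≤ i)]
  | succ n ih =>
    intro l i hle
    rw [pvALoop]
    by_cases h : i + 1 < l.length
    · simp only [h, dite_true]
      have hi : i < l.length := by omega
      have hdrop1 : l.drop i = l[i] :: l.drop (i + 1) := List.drop_eq_getElem_cons hi
      have hdrop2 : l.drop (i + 1) = l[i + 1] :: l.drop (i + 2) := List.drop_eq_getElem_cons h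
      by_cases hc : l[i] = ' ' ∧ l[i + 1] = ' '
      · simp only [hc, and_self, if_true]
        set l' := l.take (i + 1) ++ l.drop (i + 2) with hl'
        have hlen' : l'.length = l.length - 1 := by
          simp [hl', List.length_append, List.length_take, List.length_drop]; omega
        have ihres := ih l' i (by omega)
        rw [ihres]
        have htake : l'.take i = l.take i := by
          rw [hl', List.take_append]
          have : (l.take (i + 1)).length = i + 1 := by
            simp [List.length_take]; omega
          rw [this]
          simp [List.take_take]
        have hdrop' : l'.drop i = l[i] :: l.drop (i + 2) := by
          rw [hl', List.drop_append]
          have hlt : (l.take (i + 1)).length = i + 1 := by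
            simp [List.length_take]; omega
          rw [hlt]
          have : (l.take (i + 1)).drop i = [l[i]] := by
            rw [List.drop_take]
            rw [show i + 1 - i = 1 from by omega, hdrop1]
            rfl
          rw [this]
          simp
        rw [htake, hdrop', hdrop1, hdrop2, hc.1, hc.2]
        simp [pvSq]
      · simp only [hc, if_false]
        rw [ih l (i + 1) (by omega)]
        rw [hdrop1]
        have htake : l.take (i + 1) = l.take i ++ [l[i]] := by
          rw [List.take_succ]
          simp [List.getElem?_eq_getElem hi]
        rw [htake]
        by_cases hci : l[i] = ' '
        · have hci1 : l[i + 1] ≠ ' ' := fun hh => hc ⟨hci, hh⟩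
          rw [hci]
          have : pvSq (' ' :: l.drop (i + 1)) false = ' ' :: pvSq (l.drop (i + 1)) true := by
            simp [pvSq]
          rw [this, pvSq_true_of_head_ne]
          · simp
          · intro c hcmem
            rw [hdrop2] at hcmem
            simp only [List.head?_cons, Option.mem_def, Option.some.injEq] at hcmem
            exact hcmem ▸ hci1
        · simp [pvSq, hci]
          rw [← List.singleton_append, ← List.append_assoc, ← htake]
    · simp only [h, dite_false]
      by_cases hi : i < l.length
      · have hlen : l.length = i + 1 := by omega
        have hdrop1 : l.drop i = [l[i]] := by
          rw [List.drop_eq_getElem_cons hi]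
          have : l.drop (i + 1) = [] := List.drop_eq_nil_of_le (by omega)
          rw [this]
        rw [hdrop1]
        have : pvSq [l[i]] false = [l[i]] := by
          by_cases hci : l[i] = ' ' <;> simp [pvSq, hci]
        rw [this, ← hdrop1, List.take_append_drop]
      · have hd : l.drop i = [] := List.drop_eq_nil_of_le (by omega)
        rw [hd]
        simp [pvSq, List.take_of_length_le (by omega : l.length ≤ i)]

theorem pvALoop_eq_sq (l : List Char) : pvALoop l 0 = pvSq l false := by
  have := pvALoop_eq_aux l.length l 0 (by omega)
  simpa using this

-- ===== VERDICT (by name: the statement is the Claim_ definition above) =====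
theorem song_decoder_spec : Claim_equal_song_decoder := by
  intro song _
  unfold Spec_song_decoder song_decoder song_decoder_alt
  rw [pvALoop_eq_sq, pvBLoop_eq]
  simp
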